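-- pv_equiv track=rewrite | github.com/ppnati33/primer_designer | main/bitap_search/bitap_search_1.py | calculate_m_array
-- ===== SOURCE A (Python) =====
-- def calculate_m_array(patterns, errors):
--     Ms = []
--     for k in range(errors + 1):
--         if k == 0 or k == 1:
--             M = 0
--             for pattern_num in range(len(patterns)):
--                 for pos in range(len(patterns[pattern_num])):
--                     if pos != len(patterns[pattern_num]) - 1:
--                         M |= 1
--                         M <<= 1
--                     if pos == len(patterns[pattern_num]) - 1 and pattern_num != len(patterns) - 1:
--                         M <<= 1
--             M >>= 1
--             Ms.append(M)
--         else: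
--             Ms.append(0)
--     return Ms
-- ===== SOURCE B (Python) =====
-- def calculate_m_array(patterns, errors):
--     M = 0
--     last = len(patterns) - 1
--     for i, p in enumerate(patterns):
--         L = len(p)
--         if L:
--             # append a block of (L-1) one-bits in one arithmetic step
--             M = (M << (L - 1)) + ((1 << (L - 1)) - 1)
--             if i != last:
--                 M <<= 1  # separator zero-bit between patterns
--     return [M if k < 2 else 0 for k in range(errors + 1)]
-- ===== Notes on version B (the rewrite author's own statement) =====
-- stated objective: faster
-- what changed: B drops A's per-position inner loop and its per-k recomputation: the bitmask M is computed once with one arithmetic block-append (shift + add of 2^(L-1)-1) per pattern, then the result list is a single comprehension over range(errors+1).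
import Mathlib
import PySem

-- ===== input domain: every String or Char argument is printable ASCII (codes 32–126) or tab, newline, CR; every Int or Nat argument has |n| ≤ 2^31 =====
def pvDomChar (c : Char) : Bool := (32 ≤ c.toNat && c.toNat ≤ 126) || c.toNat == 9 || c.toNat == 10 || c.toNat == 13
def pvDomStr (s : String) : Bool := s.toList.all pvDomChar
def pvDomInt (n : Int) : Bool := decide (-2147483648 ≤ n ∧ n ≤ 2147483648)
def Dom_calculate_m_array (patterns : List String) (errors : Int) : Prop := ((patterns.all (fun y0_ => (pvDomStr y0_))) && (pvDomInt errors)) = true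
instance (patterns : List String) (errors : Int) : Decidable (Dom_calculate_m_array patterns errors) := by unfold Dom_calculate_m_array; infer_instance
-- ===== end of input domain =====

-- B replaces A's per-position inner loop by one arithmetic block-append per pattern and
-- hoists the single M computation out of the k-loop (objective: simpler).

-- ===== PORT A =====
-- literal transliteration of A; '<<'/'>>'/'|' are Int <<< / >>> / PySem.Int.bor (Python-exact)
def calculate_m_array (patterns : List String) (errors : Int) : List Int :=
  (PySem.List.pyRange 0 (errors + 1) 1).foldl (fun Ms k =>
    if k = 0 ∨ k = 1 then
      let M : Int :=
        (PySem.List.pyRange 0 (patterns.length : Int) 1).foldl (fun M pattern_num =>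
          let p := PySem.List.pyGetD patterns pattern_num ""
          (PySem.List.pyRange 0 (PySem.Str.len p) 1).foldl (fun M pos =>
            let M1 := if pos ≠ PySem.Str.len p - 1 then (PySem.Int.bor M 1) <<< (1 : Nat) else M
            if pos = PySem.Str.len p - 1 ∧ pattern_num ≠ (patterns.length : Int) - 1
            then M1 <<< (1 : Nat) else M1) M) 0
      Ms ++ [M >>> (1 : Nat)]
    else Ms ++ [0]) []

-- ===== PORT B =====
-- literal transliteration of Source B; (L-1).toNat is exact since the branch guarantees L ≥ 1
def calculate_m_array_alt (patterns : List String) (errors : Int) : List Int :=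
  let last : Int := (patterns.length : Int) - 1
  let M : Int := (PySem.List.enumerate patterns 0).foldl (fun M ip =>
    let L := PySem.Str.len ip.2
    if L ≠ 0 then
      let M1 := (M <<< (L - 1).toNat) + (((1:Int) <<< (L - 1).toNat) - 1)
      if ip.1 ≠ last then M1 <<< (1 : Nat) else M1
    else M) 0
  (PySem.List.pyRange 0 (errors + 1) 1).map (fun k => if k < 2 then M else 0)

-- ===== PRECONDITION & SPEC =====
def Spec_calculate_m_array (patterns : List String) (errors : Int) (out : List Int) : Prop := out = calculate_m_array_alt patterns errors
instance (patterns : List String) (errors : Int) (out : List Int) : Decidable (Spec_calculate_m_array patterns errors out) := by unfold Spec_calculate_m_array; infer_instance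

-- ===== CLAIM (what is proved, stated in full; the proofs are below) =====
def Claim_equal_calculate_m_array : Prop := ∀ (patterns : List String) (errors : Int), Dom_calculate_m_array patterns errors → Spec_calculate_m_array patterns errors (calculate_m_array patterns errors)

-- ===== LEMMAS AND PROOFS =====

-- even nonnegative M: M | 1 = M + 1
theorem pv_bor_two_mul_one (X : Int) (h : 0 ≤ X) : PySem.Int.bor (2*X) 1 = 2*X + 1 := by
  rw [PySem.Int.bor_of_nonneg (by omega) (by omega)]
  have hb := Nat.lor_bit false X.toNat true 0
  simp [Nat.bit] at hb
  rw [show ((2*X).toNat : Nat) = 2*X.toNat by omega, show ((1:Int).toNat : Nat) = 1 from rfl, hb]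
  omega

-- iterating M := (M | 1) << 1 over m items, from an even nonnegative start
theorem pv_iter_ones (m : Nat) (B : Int) (hB : 0 ≤ B) :
    (PySem.List.pyRange 0 (m : Int) 1).foldl
      (fun M _ => (PySem.Int.bor M 1) <<< (1 : Nat)) (2*B)
    = 2*(2^m*B + 2^m - 1) := by
  induction m with
  | zero =>
    rw [show ((0:Nat) : Int) = 0 from rfl, PySem.List.pyRange_one_eq_nil le_rfl]
    simp only [List.foldl_nil, pow_zero, one_mul]
    ring
  | succ m ih =>
    have hcast : ((m+1 : Nat) : Int) = (m : Int) + 1 := by push_cast; ring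
    rw [hcast, PySem.List.pyRange_one_succ_right (by omega), List.foldl_append, ih]
    have h1 : (0:Int) ≤ 2^m*B := mul_nonneg (by positivity) hB
    have h2 : (1:Int) ≤ 2^m := one_le_pow₀ (by norm_num)
    have hX : (0:Int) ≤ 2^m*B + 2^m - 1 := by linarith
    simp only [List.foldl_cons, List.foldl_nil]
    rw [pv_bor_two_mul_one _ hX, Int.shiftLeft_eq]
    ring

-- A's inner position loop over one pattern of length n, from even M = 2*B, sep-condition c
theorem pv_innerA_eval (n : Nat) (c : Prop) [Decidable c] (B : Int) (hB : 0 ≤ B) (hn : 0 < n) :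
    (PySem.List.pyRange 0 (n : Int) 1).foldl (fun M pos =>
      if pos = (n : Int) - 1 ∧ c
      then (if pos ≠ (n : Int) - 1 then (PySem.Int.bor M 1) <<< (1 : Nat) else M) <<< (1 : Nat)
      else (if pos ≠ (n : Int) - 1 then (PySem.Int.bor M 1) <<< (1 : Nat) else M)) (2*B)
    = 2 * (if c then (2^(n-1)*B + 2^(n-1) - 1) * 2 else 2^(n-1)*B + 2^(n-1) - 1) := by
  obtain ⟨m, rfl⟩ : ∃ m, n = m + 1 := ⟨n - 1, by omega⟩
  have hcast : ((m + 1 : Nat) : Int) = (m : Int) + 1 := by push_cast; ring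
  rw [hcast, PySem.List.pyRange_one_succ_right (by omega), List.foldl_append]
  rw [PySem.List.foldl_congr_mem (PySem.List.pyRange 0 (m : Int) 1) _
        (fun M _ => (PySem.Int.bor M 1) <<< (1 : Nat)) (2*B)
        (by
          intro acc x hx
          rw [PySem.List.mem_pyRange_one] at hx
          have h1 : x ≠ (m : Int) + 1 - 1 := by omega
          have h2 : ¬(x = (m : Int) + 1 - 1 ∧ c) := fun h => h1 h.1
          simp only [if_pos h1, if_neg h2])]
  rw [pv_iter_ones m B hB]
  simp only [List.foldl_cons, List.foldl_nil, Nat.add_sub_cancel]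
  have h1 : ¬((m : Int) ≠ (m : Int) + 1 - 1) := by omega
  have h2 : ((m : Int) = (m : Int) + 1 - 1 ∧ c) ↔ c := by
    constructor
    · exact fun h => h.2
    · exact fun h => ⟨by omega, h⟩
  simp only [if_neg h1]
  by_cases hc2 : c
  · rw [if_pos (h2.mpr hc2), if_pos hc2, Int.shiftLeft_eq]
    ring
  · rw [if_neg (fun h => hc2 (h2.mp h)), if_neg hc2]

-- one pattern step: A's inner loop from 2*B is twice B's block-append step, which stays nonnegative
theorem pv_step (p : String) (c : Prop) [Decidable c] (B : Int) (hB : 0 ≤ B) :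
    ((PySem.List.pyRange 0 (PySem.Str.len p) 1).foldl (fun M pos =>
      if pos = PySem.Str.len p - 1 ∧ c
      then (if pos ≠ PySem.Str.len p - 1 then (PySem.Int.bor M 1) <<< (1 : Nat) else M) <<< (1 : Nat)
      else (if pos ≠ PySem.Str.len p - 1 then (PySem.Int.bor M 1) <<< (1 : Nat) else M)) (2*B)
    = 2 * (if PySem.Str.len p ≠ 0 then
        (if c
         then ((B <<< (PySem.Str.len p - 1).toNat) + (((1:Int) <<< (PySem.Str.len p - 1).toNat) - 1)) <<< (1 : Nat)
         else (B <<< (PySem.Str.len p - 1).toNat) + (((1:Int) <<< (PySem.Str.len p - 1).toNat) - 1))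
      else B))
    ∧ 0 ≤ (if PySem.Str.len p ≠ 0 then
        (if c
         then ((B <<< (PySem.Str.len p - 1).toNat) + (((1:Int) <<< (PySem.Str.len p - 1).toNat) - 1)) <<< (1 : Nat)
         else (B <<< (PySem.Str.len p - 1).toNat) + (((1:Int) <<< (PySem.Str.len p - 1).toNat) - 1))
      else B) := by
  rw [PySem.Str.len_eq]
  rcases Nat.eq_zero_or_pos p.toList.length with h0 | hpos
  · rw [h0]
    simp only [Nat.cast_zero, PySem.List.pyRange_one_eq_nil le_rfl, List.foldl_nil,
      ne_eq, not_true_eq_false, if_false]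
    exact ⟨by trivial, hB⟩
  · have hne : ((p.toList.length : Int) ≠ 0) := by omega
    have htn : ((p.toList.length : Int) - 1).toNat = p.toList.length - 1 := by omega
    rw [pv_innerA_eval p.toList.length c B hB hpos, if_pos hne, htn]
    have hsB : B <<< (p.toList.length - 1) = 2 ^ (p.toList.length - 1) * B := by
      rw [Int.shiftLeft_eq]; ring
    have hs1 : (1:Int) <<< (p.toList.length - 1) = 2 ^ (p.toList.length - 1) := by
      rw [Int.shiftLeft_eq]; ring
    have h1 : (0:Int) ≤ 2 ^ (p.toList.length - 1) * B := mul_nonneg (by positivity) hB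
    have h2 : (1:Int) ≤ 2 ^ (p.toList.length - 1) := one_le_pow₀ (by norm_num)
    rw [hsB, hs1]
    by_cases hc : c
    · rw [if_pos hc, if_pos hc, Int.shiftLeft_eq]
      constructor
      · ring
      · nlinarith
    · rw [if_neg hc, if_neg hc]
      exact ⟨by ring, by linarith⟩

-- the whole pattern loop: A's run from 2*B equals twice B's run from B, and B's run is nonnegative
theorem pv_main_fold (patterns : List String) :
    ∀ (suf : List String) (s : Nat) (B : Int), 0 ≤ B → patterns.drop s = suf →
    (PySem.List.pyRange (s : Int) (patterns.length : Int) 1).foldl (fun M pattern_num =>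
        (PySem.List.pyRange 0 (PySem.Str.len (PySem.List.pyGetD patterns pattern_num "")) 1).foldl (fun M pos =>
          if pos = PySem.Str.len (PySem.List.pyGetD patterns pattern_num "") - 1 ∧ pattern_num ≠ (patterns.length : Int) - 1
          then (if pos ≠ PySem.Str.len (PySem.List.pyGetD patterns pattern_num "") - 1 then (PySem.Int.bor M 1) <<< (1 : Nat) else M) <<< (1 : Nat)
          else (if pos ≠ PySem.Str.len (PySem.List.pyGetD patterns pattern_num "") - 1 then (PySem.Int.bor M 1) <<< (1 : Nat) else M)) M) (2*B)
    = 2 * ((PySem.List.enumerate suf (s : Int)).foldl (fun (M : Int) ip =>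
        if PySem.Str.len ip.2 ≠ 0 then
          (if ip.1 ≠ (patterns.length : Int) - 1
           then ((M <<< (PySem.Str.len ip.2 - 1).toNat) + (((1:Int) <<< (PySem.Str.len ip.2 - 1).toNat) - 1)) <<< (1 : Nat)
           else (M <<< (PySem.Str.len ip.2 - 1).toNat) + (((1:Int) <<< (PySem.Str.len ip.2 - 1).toNat) - 1))
        else M) B)
    ∧ 0 ≤ ((PySem.List.enumerate suf (s : Int)).foldl (fun (M : Int) ip =>
        if PySem.Str.len ip.2 ≠ 0 then
          (if ip.1 ≠ (patterns.length : Int) - 1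
           then ((M <<< (PySem.Str.len ip.2 - 1).toNat) + (((1:Int) <<< (PySem.Str.len ip.2 - 1).toNat) - 1)) <<< (1 : Nat)
           else (M <<< (PySem.Str.len ip.2 - 1).toNat) + (((1:Int) <<< (PySem.Str.len ip.2 - 1).toNat) - 1))
        else M) B) := by
  intro suf
  induction suf with
  | nil =>
    intro s B hB hdrop
    have hlen : patterns.length ≤ s := by
      by_contra h
      have := congrArg List.length hdrop
      rw [List.length_drop] at this
      simp at this
      omega
    rw [PySem.List.pyRange_one_eq_nil (by exact_mod_cast hlen)]
    exact ⟨rfl, hB⟩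
  | cons p rest ih =>
    intro s B hB hdrop
    have hs : s < patterns.length := by
      by_contra h
      rw [List.drop_eq_nil_of_le (by omega)] at hdrop
      exact absurd hdrop (by simp)
    have hget : PySem.List.pyGetD patterns (s : Int) "" = p := by
      rw [PySem.List.pyGetD_natCast]
      have hq : patterns[s]? = some p := by
        have hd : (List.drop s patterns)[0]? = patterns[s+0]? := List.getElem?_drop
        rw [hdrop] at hd
        simpa using hd.symm
      simp [List.getD, hq]
    have hdrop' : patterns.drop (s+1) = rest := by
      have hdd : patterns.drop (s+1) = (patterns.drop s).drop 1 := by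
        rw [List.drop_drop]
      rw [hdd, hdrop]
      rfl
    rw [PySem.List.pyRange_one_cons (by exact_mod_cast hs), List.foldl_cons,
        PySem.List.enumerate_cons, List.foldl_cons, hget]
    obtain ⟨hstep, hpos⟩ := pv_step p ((s : Int) ≠ (patterns.length : Int) - 1) B hB
    rw [hstep]
    have hcast : (s : Int) + 1 = ((s + 1 : Nat) : Int) := by push_cast; ring
    rw [hcast]
    exact ih (s+1) _ hpos hdrop'

-- ===== VERDICT (by name: the statement is the Claim_ definition above) =====
theorem calculate_m_array_spec : Claim_equal_calculate_m_array := by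
  intro patterns errors _
  obtain ⟨hmain, -⟩ := pv_main_fold patterns patterns 0 0 le_rfl rfl
  simp only [Nat.cast_zero] at hmain
  rw [show (2:Int) * 0 = 0 from by ring] at hmain
  have hshift : ∀ X : Int, (2*X) >>> (1:Nat) = X := by
    intro X
    rw [Int.shiftRight_eq_div_pow]
    norm_num
  simp only [Spec_calculate_m_array, calculate_m_array, calculate_m_array_alt]
  simp only [hmain, hshift]
  rw [PySem.List.foldl_congr_mem (PySem.List.pyRange 0 (errors + 1) 1) _
        (fun Ms k => Ms ++ [if k = 0 ∨ k = 1 then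
          (PySem.List.enumerate patterns 0).foldl (fun (M : Int) ip =>
            if PySem.Str.len ip.2 ≠ 0 then
              (if ip.1 ≠ (patterns.length : Int) - 1
               then ((M <<< (PySem.Str.len ip.2 - 1).toNat) + (((1:Int) <<< (PySem.Str.len ip.2 - 1).toNat) - 1)) <<< (1 : Nat)
               else (M <<< (PySem.Str.len ip.2 - 1).toNat) + (((1:Int) <<< (PySem.Str.len ip.2 - 1).toNat) - 1))
            else M) 0
          else 0]) []
        (by
          intro acc x _
          split_ifs with h
          · simp only [if_pos h]
          · simp only [if_neg h])]
  rw [PySem.List.foldl_append_singleton_eq_map, List.nil_append]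
  apply List.map_congr_left
  intro k hk
  rw [PySem.List.mem_pyRange_one] at hk
  by_cases h : k < 2
  · rw [if_pos (by omega : k = 0 ∨ k = 1), if_pos h]
  · rw [if_neg (by omega : ¬(k = 0 ∨ k = 1)), if_neg h]
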